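-- pv_equiv track=rewrite | github.com/elpuma4k/TareasEstructurasDeDatos | tarea1.py | sumarValoresMatriz
-- ===== SOURCE A (Python) =====
-- def sumarValoresMatriz(mat, par):
--     contSuma = 0
--     for i in range(len(par)):
--         fila = par[i][0]
--         col = par[i][1]
--         if fila in mat:
--             sublista = mat[fila]
--             for j in range(len(sublista)):
--                 columna = sublista[j][0]
--                 valor = sublista[j][1]
--                 if columna == col:
--                     contSuma += valor
--     return contSuma
-- ===== SOURCE B (Python) =====
-- def sumarValoresMatriz(mat, par):
--     # Count multiplicity of each requested (row, col) pair, then sweep the matrix once.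
--     cnt = {}
--     for p in par:
--         k = (p[0], p[1])
--         cnt[k] = cnt.get(k, 0) + 1
--     total = 0
--     for fila, sublista in mat.items():
--         for columna, valor in sublista:
--             total += valor * cnt.get((fila, columna), 0)
--     return total
-- ===== Notes on version B (the rewrite author's own statement) =====
-- stated objective: alternative
-- what changed: Instead of looping over par and rescanning the looked-up row for each query, B builds a multiplicity counter of the requested (row,col) pairs once and then makes a single pass over the matrix entries, adding value * multiplicity.
import Mathlib
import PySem

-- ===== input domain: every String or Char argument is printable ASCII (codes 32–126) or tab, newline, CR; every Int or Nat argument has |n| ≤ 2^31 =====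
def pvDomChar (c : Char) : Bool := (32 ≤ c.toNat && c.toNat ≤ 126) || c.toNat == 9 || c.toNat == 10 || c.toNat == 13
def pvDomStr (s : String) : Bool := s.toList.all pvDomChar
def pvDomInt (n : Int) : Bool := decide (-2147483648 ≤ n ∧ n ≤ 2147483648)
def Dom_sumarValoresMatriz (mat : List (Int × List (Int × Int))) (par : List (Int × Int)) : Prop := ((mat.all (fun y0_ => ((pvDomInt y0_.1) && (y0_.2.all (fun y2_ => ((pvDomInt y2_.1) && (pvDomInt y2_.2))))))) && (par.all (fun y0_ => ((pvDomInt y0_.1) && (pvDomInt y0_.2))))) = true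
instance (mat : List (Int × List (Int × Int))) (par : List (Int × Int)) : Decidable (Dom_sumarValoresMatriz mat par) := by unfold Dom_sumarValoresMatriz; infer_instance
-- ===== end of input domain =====

-- B replaces A's per-query scan of the looked-up row by one counter of the requested
-- (row, col) pairs plus a single sweep over the matrix entries (objective: alternative).

-- ===== PORT A =====
def sumarValoresMatriz (mat : List (Int × List (Int × Int))) (par : List (Int × Int)) : Int :=
  par.foldl (fun contSuma p =>
    let fila := p.1
    let col := p.2
    match (PySem.Dict.mk mat).get? fila with   -- 'if fila in mat: sublista = mat[fila]'
    | some sublista =>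
        sublista.foldl (fun acc q =>
          let columna := q.1
          let valor := q.2
          if columna == col then acc + valor else acc) contSuma
    | none => contSuma) 0

-- ===== PORT B =====
-- B's counter dict 'cnt' of requested (row, col) pairs (cnt[k] = cnt.get(k, 0) + 1)
def pvCntB (par : List (Int × Int)) : PySem.Dict (Int × Int) Int :=
  par.foldl (fun d p => d.insert (p.1, p.2) (d.getD (p.1, p.2) 0 + 1)) PySem.Dict.empty

def sumarValoresMatriz_alt (mat : List (Int × List (Int × Int))) (par : List (Int × Int)) : Int :=
  mat.foldl (fun total r =>
    r.2.foldl (fun t q => t + q.2 * (pvCntB par).getD (r.1, q.1) 0) total) 0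

-- ===== PRECONDITION & SPEC =====
-- Pre_ requires the row keys of mat to be pairwise distinct: mat is a Python dict, whose
-- keys are always distinct, so this excludes no input the Python A accepts — only the
-- duplicate-key association lists of the Lean encoding, which denote no Python dict.
def Pre_sumarValoresMatriz (mat : List (Int × List (Int × Int))) (par : List (Int × Int)) : Prop :=
  (mat.map Prod.fst).Nodup
instance (mat : List (Int × List (Int × Int))) (par : List (Int × Int)) : Decidable (Pre_sumarValoresMatriz mat par) := by unfold Pre_sumarValoresMatriz; infer_instance
def pvWitness_sumarValoresMatriz : (List (Int × List (Int × Int))) × (List (Int × Int)) :=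
  ([(0, [(1, 2), (3, 4)]), (1, [(1, 5)])], [(0, 1), (1, 1), (0, 1)])
def Spec_sumarValoresMatriz (mat : List (Int × List (Int × Int))) (par : List (Int × Int)) (out : Int) : Prop := out = sumarValoresMatriz_alt mat par
instance (mat : List (Int × List (Int × Int))) (par : List (Int × Int)) (out : Int) : Decidable (Spec_sumarValoresMatriz mat par out) := by unfold Spec_sumarValoresMatriz; infer_instance

-- ===== CLAIM (what is proved, stated in full; the proofs are below) =====
def Claim_equal_sumarValoresMatriz : Prop := ∀ (mat : List (Int × List (Int × Int))) (par : List (Int × Int)), Dom_sumarValoresMatriz mat par → Pre_sumarValoresMatriz mat par → Spec_sumarValoresMatriz mat par (sumarValoresMatriz mat par)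

-- ===== LEMMAS AND PROOFS =====

-- A's contribution of one query p against mat
def pvHit (mat : List (Int × List (Int × Int))) (p : Int × Int) : Int :=
  match (PySem.Dict.mk mat).get? p.1 with
  | some sublista => (sublista.map (fun q => if q.1 == p.2 then q.2 else 0)).sum
  | none => 0

-- B's double sum over the matrix with an arbitrary multiplicity function
def pvSweep (mat : List (Int × List (Int × Int))) (c : Int × Int → Int) : Int :=
  (mat.map (fun r => (r.2.map (fun q => q.2 * c (r.1, q.1))).sum)).sum

lemma a_fold (mat : List (Int × List (Int × Int))) (par : List (Int × Int)) (a : Int) :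
    par.foldl (fun contSuma p =>
      let fila := p.1
      let col := p.2
      match (PySem.Dict.mk mat).get? fila with
      | some sublista =>
          sublista.foldl (fun acc q =>
            let columna := q.1
            let valor := q.2
            if columna == col then acc + valor else acc) contSuma
      | none => contSuma) a = a + (par.map (pvHit mat)).sum := by
  induction par generalizing a with
  | nil => simp
  | cons p t ih =>
      simp only [List.foldl_cons, List.map_cons, List.sum_cons, ih]
      have hstep : ∀ (b : Int),
          (match (PySem.Dict.mk mat).get? p.1 with
           | some sublista =>
               sublista.foldl (fun acc q => if q.1 == p.2 then acc + q.2 else acc) b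
           | none => b) = b + pvHit mat p := by
        intro b
        unfold pvHit
        cases (PySem.Dict.mk mat).get? p.1 with
        | none => simp
        | some sub =>
            simp only
            induction sub generalizing b with
            | nil => simp
            | cons q u ihq =>
                simp only [List.foldl_cons, List.map_cons, List.sum_cons]
                split <;> rw [ihq] <;> ring
      rw [hstep]
      ring

lemma pvSweep_add (mat : List (Int × List (Int × Int))) (c d : Int × Int → Int) :
    pvSweep mat (fun k => c k + d k) = pvSweep mat c + pvSweep mat d := by
  unfold pvSweep
  rw [← List.sum_map_add]
  congr 1
  apply List.map_congr_left
  intro r _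
  rw [← List.sum_map_add]
  congr 1
  apply List.map_congr_left
  intro q _
  ring

lemma pvSweep_congr (mat : List (Int × List (Int × Int))) (c d : Int × Int → Int)
    (h : ∀ k, c k = d k) : pvSweep mat c = pvSweep mat d := by
  simp [funext h]

lemma sweep_zero (mat : List (Int × List (Int × Int))) :
    pvSweep mat (fun _ => 0) = 0 := by
  simp [pvSweep]

lemma sweep_single_notin (mat : List (Int × List (Int × Int))) (p : Int × Int)
    (h : p.1 ∉ mat.map Prod.fst) :
    pvSweep mat (fun k => if k = p then 1 else 0) = 0 := by
  induction mat with
  | nil => simp [pvSweep]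
  | cons r t ih =>
      simp only [List.map_cons, List.mem_cons, not_or] at h
      unfold pvSweep
      simp only [List.map_cons, List.sum_cons]
      have ht := ih h.2
      unfold pvSweep at ht
      rw [ht]
      have : (r.2.map (fun q => q.2 * (if (r.1, q.1) = p then 1 else 0))).sum = 0 := by
        have : ∀ q ∈ r.2, q.2 * (if (r.1, q.1) = p then (1:Int) else 0) = 0 := by
          intro q _
          have : (r.1, q.1) ≠ p := by
            intro he; exact h.1 (by rw [← he])
          simp [this]
        rw [List.map_congr_left (fun q hq => this q hq)]
        simp
      rw [this]; ring

lemma sweep_single (mat : List (Int × List (Int × Int))) (p : Int × Int)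
    (hnd : (mat.map Prod.fst).Nodup) :
    pvSweep mat (fun k => if k = p then 1 else 0) = pvHit mat p := by
  induction mat with
  | nil => simp [pvSweep, pvHit, PySem.Dict.get?]
  | cons r t ih =>
      obtain ⟨rk, rv⟩ := r
      simp only [List.map_cons, List.nodup_cons] at hnd
      unfold pvSweep pvHit
      simp only [List.map_cons, List.sum_cons]
      rw [PySem.Dict.get?_mk_cons]
      by_cases hr : rk = p.1
      · have hb : (rk == p.1) = true := by simp [hr]
        rw [hb]
        simp only
        have ht0 : pvSweep t (fun k => if k = p then 1 else 0) = 0 := by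
          apply sweep_single_notin
          rw [← hr]; exact hnd.1
        unfold pvSweep at ht0
        rw [ht0]
        have hhead : ∀ q ∈ rv, q.2 * (if ((rk, q.1) : Int × Int) = p then (1:Int) else 0)
            = if q.1 == p.2 then q.2 else 0 := by
          intro q _
          have : ((rk, q.1) : Int × Int) = p ↔ q.1 = p.2 := by
            constructor
            · intro he; rw [← he]
            · intro he; rw [hr, he]
          by_cases hc : q.1 = p.2
          · rw [if_pos (this.mpr hc)]
            simp [hc]
          · rw [if_neg (fun he => hc (this.mp he))]
            simp [hc]
        rw [List.map_congr_left hhead]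
        simp
      · have hb : (rk == p.1) = false := by simp [hr]
        rw [hb]
        simp only [Bool.false_eq_true, if_false]
        have hhead : ∀ q ∈ rv, q.2 * (if ((rk, q.1) : Int × Int) = p then (1:Int) else 0) = 0 := by
          intro q _
          have : ((rk, q.1) : Int × Int) ≠ p := by
            intro he; exact hr (by rw [← he])
          simp [this]
        rw [List.map_congr_left hhead]
        have := ih hnd.2
        unfold pvSweep pvHit at this
        rw [this]
        simp

lemma cnt_getD (par : List (Int × Int)) (k : Int × Int) :
    (pvCntB par).getD k 0 = (par.count k : Int) := by
  unfold pvCntB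
  have h : (fun (d : PySem.Dict (Int × Int) Int) (p : Int × Int) =>
      d.insert (p.1, p.2) (d.getD (p.1, p.2) 0 + 1)) = fun d p => d.insert p (d.getD p 0 + 1) := by
    funext d p; rw [Prod.eta]
  rw [h, PySem.Dict.getD_foldl_insert_add_one]
  simp

lemma b_fold (mat : List (Int × List (Int × Int))) (c : Int × Int → Int) (a : Int) :
    mat.foldl (fun total r => r.2.foldl (fun t q => t + q.2 * c (r.1, q.1)) total) a
      = a + pvSweep mat c := by
  induction mat generalizing a with
  | nil => simp [pvSweep]
  | cons r t ih =>
      simp only [List.foldl_cons]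
      rw [ih, PySem.List.foldl_add (l := r.2) (a := a) (g := fun q => q.2 * c (r.1, q.1))]
      unfold pvSweep
      simp only [List.map_cons, List.sum_cons]
      ring

lemma b_eq_sweep (mat : List (Int × List (Int × Int))) (par : List (Int × Int)) :
    sumarValoresMatriz_alt mat par = pvSweep mat (fun k => (par.count k : Int)) := by
  unfold sumarValoresMatriz_alt
  rw [b_fold mat (fun k => (pvCntB par).getD k 0)]
  rw [pvSweep_congr mat _ _ (fun k => cnt_getD par k)]
  ring

lemma sweep_count (mat : List (Int × List (Int × Int))) (par : List (Int × Int))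
    (hnd : (mat.map Prod.fst).Nodup) :
    pvSweep mat (fun k => (par.count k : Int)) = (par.map (pvHit mat)).sum := by
  induction par with
  | nil =>
      rw [pvSweep_congr mat _ (fun _ => 0) (by intro k; simp)]
      simp [sweep_zero]
  | cons p t ih =>
      rw [pvSweep_congr mat _ (fun k => (t.count k : Int) + (if k = p then 1 else 0))
        (by intro k; rw [List.count_cons]; push_cast; congr 1
            simp only [beq_iff_eq]
            by_cases h : k = p
            · rw [if_pos h.symm, if_pos h]
            · rw [if_neg (fun e => h e.symm), if_neg h])]
      rw [pvSweep_add, ih, sweep_single mat p hnd]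
      simp only [List.map_cons, List.sum_cons]
      ring

-- ===== VERDICT (by name: the statement is the Claim_ definition above) =====
theorem sumarValoresMatriz_spec : Claim_equal_sumarValoresMatriz := by
  intro mat par _ hpre
  unfold Spec_sumarValoresMatriz
  unfold sumarValoresMatriz
  rw [a_fold, b_eq_sweep, sweep_count mat par hpre]
  ring
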